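-- pv_equiv track=rewrite | github.com/payjoin/rust-payjoin | .github/scripts/standup_lib.py | format_contributor_comment
-- ===== SOURCE A (Python) =====
-- def format_contributor_comment(
--     user,
--     merged_prs,
--     reviewed_prs,
--     issues_opened,
--     bottlenecks,
--     previous_thread_url=None,
--     include_last_week=True,
-- ):
--     """Format the threaded reply for a contributor.
--
--     With ``include_last_week=True`` (Monday's bulk post) the body opens with a
--     user header + @-mention and ends with a "Last Week" link block. With
--     ``include_last_week=False`` (on-demand /check-in reply) the body starts at
--     ``### Shipped`` so the per-week-cap success marker matches, and there is no
--     @-mention of the commenter.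
--     """
--     lines = []
--     if include_last_week:
--         lines.extend([f"## {user}", "", f"@{user}", ""])
--
--     # SHIPPED section
--     lines.append("### Shipped")
--     if merged_prs or reviewed_prs or issues_opened:
--         if merged_prs:
--             lines.append("")
--             lines.append("**PRs merged:**")
--             for pr in merged_prs:
--                 lines.append(f"- [{pr['title']}]({pr['html_url']})")
--
--         if reviewed_prs:
--             lines.append("")
--             lines.append("**PRs reviewed:**")
--             for pr in reviewed_prs:
--                 lines.append(f"- [{pr['title']}]({pr['html_url']})")
--
--         if issues_opened:
--             lines.append("")
--             lines.append("**Issues opened:**")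
--             for issue in issues_opened:
--                 lines.append(f"- [{issue['title']}]({issue['html_url']})")
--     else:
--         lines.append("_No activity found._")
--
--     if include_last_week:
--         lines.append("")
--         lines.append("### Last Week")
--         if previous_thread_url:
--             lines.append("")
--             lines.append(
--                 f"Review your previous thread: [Last week's thread]({previous_thread_url})"
--             )
--         else:
--             lines.append("_No previous thread found._")
--
--     if bottlenecks:
--         lines.append("")
--         lines.append("_Auto-detected signals:_")
--         lines.extend(bottlenecks)
--
--     return "\n".join(lines)
-- ===== SOURCE B (Python) =====
-- def format_contributor_comment(
--     user,
--     merged_prs,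
--     reviewed_prs,
--     issues_opened,
--     bottlenecks,
--     previous_thread_url=None,
--     include_last_week=True,
-- ):
--     """Same comment, built by concatenating pre-rendered blocks instead of
--     appending to a lines list: the three activity sections come from one
--     labelled table."""
--     sections = [
--         ("**PRs merged:**", merged_prs),
--         ("**PRs reviewed:**", reviewed_prs),
--         ("**Issues opened:**", issues_opened),
--     ]
--     blocks = [
--         "\n\n{}\n{}".format(
--             label,
--             "\n".join("- [{}]({})".format(it["title"], it["html_url"]) for it in items),
--         )
--         for label, items in sections
--         if items
--     ]
--     body = "".join(blocks) if blocks else "\n_No activity found._"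
--     head = "## {0}\n\n@{0}\n\n".format(user) if include_last_week else ""
--     if include_last_week:
--         if previous_thread_url:
--             tail = (
--                 "\n\n### Last Week\n\nReview your previous thread: "
--                 "[Last week's thread]({})".format(previous_thread_url)
--             )
--         else:
--             tail = "\n\n### Last Week\n_No previous thread found._"
--     else:
--         tail = ""
--     if bottlenecks:
--         tail += "\n\n_Auto-detected signals:_\n" + "\n".join(bottlenecks)
--     return head + "### Shipped" + body + tail
-- ===== Notes on version B (the rewrite author's own statement) =====
-- stated objective: simpler
-- what changed: Replaces A's incremental lines-list construction (append line by line, then join) with direct concatenation of pre-rendered string blocks, the three activity sections coming from one labelled section table rendered by a single comprehension instead of three copy-pasted if-blocks.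
import Mathlib
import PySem

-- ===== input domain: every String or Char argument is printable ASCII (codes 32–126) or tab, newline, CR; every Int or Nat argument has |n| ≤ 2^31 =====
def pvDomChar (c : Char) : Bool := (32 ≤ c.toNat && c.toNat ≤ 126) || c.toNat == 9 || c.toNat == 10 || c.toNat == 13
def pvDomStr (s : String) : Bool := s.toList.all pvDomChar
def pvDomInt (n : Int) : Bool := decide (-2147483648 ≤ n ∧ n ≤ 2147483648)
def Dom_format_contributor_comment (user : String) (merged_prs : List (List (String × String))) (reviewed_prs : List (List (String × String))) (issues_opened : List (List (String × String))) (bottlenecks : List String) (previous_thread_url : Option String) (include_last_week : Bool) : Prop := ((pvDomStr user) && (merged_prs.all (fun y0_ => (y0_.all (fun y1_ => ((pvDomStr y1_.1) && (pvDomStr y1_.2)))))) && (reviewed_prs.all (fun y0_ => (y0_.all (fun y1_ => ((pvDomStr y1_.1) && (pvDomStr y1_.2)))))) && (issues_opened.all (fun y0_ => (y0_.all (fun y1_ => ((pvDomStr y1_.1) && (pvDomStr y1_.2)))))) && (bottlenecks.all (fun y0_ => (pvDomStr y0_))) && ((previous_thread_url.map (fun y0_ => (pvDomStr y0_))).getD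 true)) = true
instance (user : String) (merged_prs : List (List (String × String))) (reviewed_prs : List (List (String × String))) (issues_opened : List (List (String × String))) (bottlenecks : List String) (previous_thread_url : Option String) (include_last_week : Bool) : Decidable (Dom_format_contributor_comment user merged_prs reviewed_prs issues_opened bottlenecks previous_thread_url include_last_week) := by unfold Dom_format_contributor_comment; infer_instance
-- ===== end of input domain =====

-- B builds the comment by concatenating pre-rendered blocks from a labelled section table
-- instead of appending line by line to a list (objective: simpler decomposition, same cost).

-- ===== PORT A =====
-- shared line formatter: Python's f"- [{pr['title']}]({pr['html_url']})"; pr['…'] raises KeyError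
-- when the key is missing (excluded by Pre_), so getD's default is never reached under Pre_.
def pvBullet (pr : List (String × String)) : String :=
  "- [" ++ PySem.Dict.getD ⟨pr⟩ "title" "" ++ "](" ++ PySem.Dict.getD ⟨pr⟩ "html_url" "" ++ ")"

def format_contributor_comment (user : String) (merged_prs : List (List (String × String))) (reviewed_prs : List (List (String × String))) (issues_opened : List (List (String × String))) (bottlenecks : List String) (previous_thread_url : Option String) (include_last_week : Bool) : String :=
  let lines : List String := []
  let lines := if include_last_week then lines ++ ["## " ++ user, "", "@" ++ user, ""] else lines
  let lines := lines ++ ["### Shipped"]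
  let lines :=
    if merged_prs ≠ [] ∨ reviewed_prs ≠ [] ∨ issues_opened ≠ [] then
      let lines := if merged_prs ≠ [] then (lines ++ ["", "**PRs merged:**"]) ++ merged_prs.map pvBullet else lines
      let lines := if reviewed_prs ≠ [] then (lines ++ ["", "**PRs reviewed:**"]) ++ reviewed_prs.map pvBullet else lines
      let lines := if issues_opened ≠ [] then (lines ++ ["", "**Issues opened:**"]) ++ issues_opened.map pvBullet else lines
      lines
    else lines ++ ["_No activity found._"]
  let lines :=
    if include_last_week then
      let lines := lines ++ ["", "### Last Week"]
      -- Python truthiness of previous_thread_url: None and "" are falsy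
      match previous_thread_url with
      | some url =>
          if url ≠ "" then
            lines ++ ["", "Review your previous thread: [Last week's thread](" ++ url ++ ")"]
          else lines ++ ["_No previous thread found._"]
      | none => lines ++ ["_No previous thread found._"]
    else lines
  let lines := if bottlenecks ≠ [] then (lines ++ ["", "_Auto-detected signals:_"]) ++ bottlenecks else lines
  PySem.Str.join "\n" lines

-- ===== PORT B =====
def format_contributor_comment_alt (user : String) (merged_prs : List (List (String × String))) (reviewed_prs : List (List (String × String))) (issues_opened : List (List (String × String))) (bottlenecks : List String) (previous_thread_url : Option String) (include_last_week : Bool) : String :=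
  let sections : List (String × List (List (String × String))) :=
    [("**PRs merged:**", merged_prs), ("**PRs reviewed:**", reviewed_prs), ("**Issues opened:**", issues_opened)]
  let blocks := (sections.filter (fun s => s.2 ≠ [])).map
    (fun s => "\n\n" ++ s.1 ++ "\n" ++ PySem.Str.join "\n" (s.2.map pvBullet))
  let body := if blocks ≠ [] then PySem.Str.join "" blocks else "\n_No activity found._"
  let head := if include_last_week then "## " ++ user ++ "\n\n@" ++ user ++ "\n\n" else ""
  let tail :=
    if include_last_week then
      match previous_thread_url with
      | some url =>
          if url ≠ "" then
            "\n\n### Last Week\n\nReview your previous thread: [Last week's thread](" ++ url ++ ")"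
          else "\n\n### Last Week\n_No previous thread found._"
      | none => "\n\n### Last Week\n_No previous thread found._"
    else ""
  let tail := if bottlenecks ≠ [] then tail ++ "\n\n_Auto-detected signals:_\n" ++ PySem.Str.join "\n" bottlenecks else tail
  head ++ "### Shipped" ++ body ++ tail

-- ===== PRECONDITION & SPEC =====
-- Pre_ excludes exactly the inputs on which Python A raises KeyError: an activity entry
-- missing the 'title' or 'html_url' key (B raises there too).
def Pre_format_contributor_comment (user : String) (merged_prs : List (List (String × String))) (reviewed_prs : List (List (String × String))) (issues_opened : List (List (String × String))) (bottlenecks : List String) (previous_thread_url : Option String) (include_last_week : Bool) : Prop :=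
  ∀ d ∈ merged_prs ++ reviewed_prs ++ issues_opened,
    (PySem.Dict.get? ⟨d⟩ "title").isSome = true ∧ (PySem.Dict.get? ⟨d⟩ "html_url").isSome = true
instance (user : String) (merged_prs : List (List (String × String))) (reviewed_prs : List (List (String × String))) (issues_opened : List (List (String × String))) (bottlenecks : List String) (previous_thread_url : Option String) (include_last_week : Bool) : Decidable (Pre_format_contributor_comment user merged_prs reviewed_prs issues_opened bottlenecks previous_thread_url include_last_week) := by unfold Pre_format_contributor_comment; infer_instance

def pvWitness_format_contributor_comment : String × (List (List (String × String))) × (List (List (String × String))) × (List (List (String × String))) × List String × Option String × Bool :=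
  ("alice", [[("title", "Fix"), ("html_url", "http://x")]], [], [], ["- busy"], some "http://t", true)

def Spec_format_contributor_comment (user : String) (merged_prs : List (List (String × String))) (reviewed_prs : List (List (String × String))) (issues_opened : List (List (String × String))) (bottlenecks : List String) (previous_thread_url : Option String) (include_last_week : Bool) (out : String) : Prop := out = format_contributor_comment_alt user merged_prs reviewed_prs issues_opened bottlenecks previous_thread_url include_last_week
instance (user : String) (merged_prs : List (List (String × String))) (reviewed_prs : List (List (String × String))) (issues_opened : List (List (String × String))) (bottlenecks : List String) (previous_thread_url : Option String) (include_last_week : Bool) (out : String) : Decidable (Spec_format_contributor_comment user merged_prs reviewed_prs issues_opened bottlenecks previous_thread_url include_last_week out) := by unfold Spec_format_contributor_comment; infer_instance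

-- ===== CLAIM (what is proved, stated in full; the proofs are below) =====
def Claim_equal_format_contributor_comment : Prop := ∀ (user : String) (merged_prs : List (List (String × String))) (reviewed_prs : List (List (String × String))) (issues_opened : List (List (String × String))) (bottlenecks : List String) (previous_thread_url : Option String) (include_last_week : Bool), Dom_format_contributor_comment user merged_prs reviewed_prs issues_opened bottlenecks previous_thread_url include_last_week → Pre_format_contributor_comment user merged_prs reviewed_prs issues_opened bottlenecks previous_thread_url include_last_week → Spec_format_contributor_comment user merged_prs reviewed_prs issues_opened bottlenecks previous_thread_url include_last_week (format_contributor_comment user merged_prs reviewed_prs issues_opened bottlenecks previous_thread_url include_last_week)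

-- ===== LEMMAS AND PROOFS =====

-- "sep ++ s" for each remaining line, concatenated: the tail of a join past its first element.
def pvTailJoin (sep : List Char) (ls : List (List Char)) : List Char :=
  (ls.map (fun s => sep ++ s)).flatten

theorem pvTailJoin_nil (sep : List Char) : pvTailJoin sep [] = [] := rfl

theorem pvTailJoin_cons (sep a : List Char) (ls : List (List Char)) :
    pvTailJoin sep (a :: ls) = sep ++ a ++ pvTailJoin sep ls := by
  simp [pvTailJoin]

theorem pvTailJoin_append (sep : List Char) (l1 l2 : List (List Char)) :
    pvTailJoin sep (l1 ++ l2) = pvTailJoin sep l1 ++ pvTailJoin sep l2 := by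
  simp [pvTailJoin]

theorem pvJoin_cons (sep a : List Char) (ls : List (List Char)) :
    PySem.Chars.join sep (a :: ls) = a ++ pvTailJoin sep ls := by
  induction ls generalizing a with
  | nil => simp [pvTailJoin, PySem.Chars.join_singleton]
  | cons b t ih =>
      rw [PySem.Chars.join_cons_cons, ih, pvTailJoin_cons]
      simp

theorem format_contributor_comment_spec : Claim_equal_format_contributor_comment := by
  intro user merged_prs reviewed_prs issues_opened bottlenecks previous_thread_url include_last_week _ _
  unfold Spec_format_contributor_comment
  apply String.ext
  unfold format_contributor_comment format_contributor_comment_alt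
  cases include_last_week <;>
  cases merged_prs <;> cases reviewed_prs <;> cases issues_opened <;> cases bottlenecks <;>
  rcases previous_thread_url with _ | url <;>
  first
  | (by_cases h : url = "" <;>
      simp [h, PySem.Str.join, pvJoin_cons, pvTailJoin_cons, pvTailJoin_append, pvTailJoin_nil,
            List.filter, String.toList_append, List.append_assoc])
  | simp [PySem.Str.join, pvJoin_cons, pvTailJoin_cons, pvTailJoin_append, pvTailJoin_nil,
          List.filter, String.toList_append, List.append_assoc]
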